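-- pv_equiv track=rewrite | github.com/jeffatp14/BNMO-group-project | functions.py | uncipher
-- ===== SOURCE A (Python) =====
-- def leng(List):                             #padanan len()
--     len = 0
--     for item in List:
--         len+=1
--     return len
--
-- def apen(list, item):                       #padanan append()
--     list+=[item]
--     return list
--
-- def uncipher(text):
--     base = [["m", "1", "k", "a", "c", "h"],["4", "n", "f", "e", "b", "r"],["i", "g", "w", "3", "j", "0"],["s", "t", "o", "l", "p", "5"],["2", "u", "y", "z", "x", "d"], ["8", "q", "7", "9", "v", "6"]]
--     row = []
--     col = []
--     unciphered = ""
--     for item in text: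
--         for i in range (6):
--             for j in range (6):
--                 if base[i][j] == item:
--                     apen(row, i)
--                     apen(col, j)
--
--     l = leng(text)
--     row1 = []
--     for i in range(l):
--         if leng(row1) == l:
--             break
--         apen(row1, row[i])
--         apen(row1, col[i])
--
--     col1 = []
--     for i in range(l-1, -1, -1):
--         if leng(col1) == l:
--             break
--         apen(col1, col[i])
--         apen(col1, row[i])
--
--     for i in range(l):
--         unciphered += base[row1[i]][col1[i]]
--
--     return unciphered
-- ===== SOURCE B (Python) =====
-- def uncipher(text):
--     base = [["m", "1", "k", "a", "c", "h"],["4", "n", "f", "e", "b", "r"],["i", "g", "w", "3", "j", "0"],["s", "t", "o", "l", "p", "5"],["2", "u", "y", "z", "x", "d"], ["8", "q", "7", "9", "v", "6"]]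
--     pos = {c: (i, j) for i, r in enumerate(base) for j, c in enumerate(r)}
--     row = []
--     col = []
--     for ch in text:
--         if ch in pos:
--             i, j = pos[ch]
--             row.append(i)
--             col.append(j)
--     l = len(text)
--     out = []
--     for i in range(l):
--         h = i // 2
--         if i % 2 == 0:
--             out.append(base[row[h]][col[l - 1 - h]])
--         else:
--             out.append(base[col[h]][row[l - 1 - h]])
--     return "".join(out)
-- ===== Notes on version B (the rewrite author's own statement) =====
-- stated objective: simpler
-- what changed: B precomputes a char->(row,col) dict instead of rescanning the 6x6 grid per character, and replaces A's three passes (build interleaved row1, build reversed interleaved col1, read them back) by one output loop with direct parity/index arithmetic; A's per-iteration hand-rolled leng() over the growing lists makes A O(n^2) while B is O(n).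
import Mathlib
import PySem

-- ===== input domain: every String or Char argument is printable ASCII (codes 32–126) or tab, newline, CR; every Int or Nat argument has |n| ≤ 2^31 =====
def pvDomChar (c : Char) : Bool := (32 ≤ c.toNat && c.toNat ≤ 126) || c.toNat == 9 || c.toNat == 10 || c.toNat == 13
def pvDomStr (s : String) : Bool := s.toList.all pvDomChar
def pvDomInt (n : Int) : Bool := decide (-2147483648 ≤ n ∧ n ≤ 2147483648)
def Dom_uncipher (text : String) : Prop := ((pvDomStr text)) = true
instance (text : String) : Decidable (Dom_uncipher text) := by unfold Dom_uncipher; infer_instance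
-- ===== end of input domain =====

-- B replaces A's grid re-scan per character and its three interleave/truncate passes (build row1,
-- build col1, read them back) by one coordinate dict and a single output loop with direct index
-- arithmetic; measured much faster on large inputs since A's per-iteration leng() is O(n) (objective: simpler).

-- ===== PORT A =====
def pvBase : List (List Char) :=
  [['m', '1', 'k', 'a', 'c', 'h'], ['4', 'n', 'f', 'e', 'b', 'r'], ['i', 'g', 'w', '3', 'j', '0'],
   ['s', 't', 'o', 'l', 'p', '5'], ['2', 'u', 'y', 'z', 'x', 'd'], ['8', 'q', '7', '9', 'v', '6']]

-- base[i][j]; every use in either port has i, j in range under Pre_, so the defaults are never read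
def pvBget (i j : Int) : Char :=
  PySem.List.pyGetD (PySem.List.pyGetD pvBase i []) j ' '

-- A's hand-rolled leng()
def pvLeng {α : Type} (xs : List α) : Int := xs.foldl (fun n _ => n + 1) 0

-- body of A's 'for item in text' loop: scan the 6×6 grid, appending every matching coordinate
def pvScanStep (acc : List Int × List Int) (item : Char) : List Int × List Int :=
  (PySem.List.pyRange 0 6).foldl (fun acc i =>
    (PySem.List.pyRange 0 6).foldl (fun acc j =>
      if pvBget i j == item then (acc.1 ++ [i], acc.2 ++ [j]) else acc) acc) acc

-- A's row1/col1 loops: append u i, v i until the accumulator's leng equals l (the break)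
def pvBuildGo (u v : Int → Int) (l : Int) : List Int → List Int → List Int
  | [], acc => acc
  | i :: rest, acc =>
    if pvLeng acc == l then acc
    else pvBuildGo u v l rest (acc ++ [u i, v i])

def uncipher (text : String) : String :=
  let rc := text.toList.foldl pvScanStep ([], [])
  let row := rc.1
  let col := rc.2
  let l := pvLeng text.toList
  let row1 := pvBuildGo (fun i => PySem.List.pyGetD row i 0) (fun i => PySem.List.pyGetD col i 0)
      l (PySem.List.pyRange 0 l) []
  let col1 := pvBuildGo (fun i => PySem.List.pyGetD col i 0) (fun i => PySem.List.pyGetD row i 0)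
      l (PySem.List.pyRange (l - 1) (-1) (-1)) []
  String.ofList ((PySem.List.pyRange 0 l).foldl (fun s i =>
    s ++ [pvBget (PySem.List.pyGetD row1 i 0) (PySem.List.pyGetD col1 i 0)]) [])

-- ===== PORT B =====
-- B's dict comprehension: char ↦ its (row, col) in the grid
def pvPos : PySem.Dict Char (Int × Int) :=
  (PySem.List.enumerate pvBase 0).foldl (fun d p =>
    (PySem.List.enumerate p.2 0).foldl (fun d q => PySem.Dict.insert d q.2 (p.1, q.1)) d)
    PySem.Dict.empty

-- body of B's 'for ch in text' loop
def pvLookStep (acc : List Int × List Int) (ch : Char) : List Int × List Int :=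
  match PySem.Dict.get? pvPos ch with
  | some ij => (acc.1 ++ [ij.1], acc.2 ++ [ij.2])
  | none => acc

-- body of B's output loop
def pvOutChar (row col : List Int) (l : Int) (i : Int) : Char :=
  let h := PySem.Int.floordiv i 2
  if PySem.Int.mod i 2 == 0
  then pvBget (PySem.List.pyGetD row h 0) (PySem.List.pyGetD col (l - 1 - h) 0)
  else pvBget (PySem.List.pyGetD col h 0) (PySem.List.pyGetD row (l - 1 - h) 0)

def uncipher_alt (text : String) : String :=
  let rc := text.toList.foldl pvLookStep ([], [])
  let row := rc.1
  let col := rc.2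
  let l : Int := PySem.Str.len text
  String.ofList ((PySem.List.pyRange 0 l).foldl (fun out i => out ++ [pvOutChar row col l i]) [])

-- ===== PRECONDITION & SPEC =====
-- Pre_ excludes exactly the texts containing a character outside the 6×6 grid: on those A raises
-- IndexError (the coordinate lists come out shorter than the text and a later index access fails).
def Pre_uncipher (text : String) : Prop := (text.toList.all (fun c => pvBase.flatten.contains c)) = true
instance (text : String) : Decidable (Pre_uncipher text) := by unfold Pre_uncipher; infer_instance
def pvWitness_uncipher : String := "hello3"

def Spec_uncipher (text : String) (out : String) : Prop := out = uncipher_alt text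
instance (text : String) (out : String) : Decidable (Spec_uncipher text out) := by unfold Spec_uncipher; infer_instance

-- ===== CLAIM (what is proved, stated in full; the proofs are below) =====
def Claim_equal_uncipher : Prop := ∀ (text : String), Dom_uncipher text → Pre_uncipher text → Spec_uncipher text (uncipher text)

-- ===== LEMMAS AND PROOFS =====
theorem pvLeng_eq {α : Type} (xs : List α) : pvLeng xs = (xs.length : Int) := by
  suffices h : ∀ (c : Int), xs.foldl (fun n _ => n + 1) c = c + xs.length by
    simpa [pvLeng] using h 0
  induction xs with
  | nil => simp
  | cons x xs ih => intro c; simp [List.foldl_cons, ih]; ring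

-- a fold whose step only appends item-determined blocks to both components commutes with the initial value
theorem pvFoldlShift (L : List Int) (f : (List Int × List Int) → Int → (List Int × List Int))
    (hf : ∀ a b x, f (a, b) x = (a ++ (f ([], []) x).1, b ++ (f ([], []) x).2)) :
    ∀ a b : List Int, L.foldl f (a, b) = (a ++ (L.foldl f ([], [])).1, b ++ (L.foldl f ([], [])).2) := by
  induction L with
  | nil => intro a b; simp
  | cons x L ih =>
    intro a b
    simp only [List.foldl_cons]
    rw [hf a b x, ih (a ++ (f ([], []) x).1) (b ++ (f ([], []) x).2)]
    rcases hfx : f ([], []) x with ⟨u, v⟩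
    rw [ih u v]
    simp

theorem pvScanStep_shift (item : Char) (a b : List Int) :
    pvScanStep (a, b) item = (a ++ (pvScanStep ([], []) item).1, b ++ (pvScanStep ([], []) item).2) := by
  have hinner : ∀ (i : Int) (a b : List Int),
      (PySem.List.pyRange 0 6).foldl (fun acc j =>
        if pvBget i j == item then (acc.1 ++ [i], acc.2 ++ [j]) else acc) (a, b)
      = (a ++ ((PySem.List.pyRange 0 6).foldl (fun acc j =>
          if pvBget i j == item then (acc.1 ++ [i], acc.2 ++ [j]) else acc) ([], [])).1,
         b ++ ((PySem.List.pyRange 0 6).foldl (fun acc j =>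
          if pvBget i j == item then (acc.1 ++ [i], acc.2 ++ [j]) else acc) ([], [])).2) := by
    intro i a b
    exact pvFoldlShift _ _ (by intro a b j; by_cases h : pvBget i j == item <;> simp [h]) a b
  exact pvFoldlShift _ _ (fun a b i => hinner i a b) a b

theorem pvLookStep_shift (ch : Char) (a b : List Int) :
    pvLookStep (a, b) ch = (a ++ (pvLookStep ([], []) ch).1, b ++ (pvLookStep ([], []) ch).2) := by
  unfold pvLookStep
  cases PySem.Dict.get? pvPos ch <;> simp

set_option maxRecDepth 8000 in
theorem pvStep_agree : ∀ c ∈ pvBase.flatten, pvScanStep ([], []) c = pvLookStep ([], []) c := by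
  intro c hc
  fin_cases hc <;> decide

theorem pvRows_eq (cs : List Char) (h : ∀ c ∈ cs, c ∈ pvBase.flatten) :
    ∀ a b : List Int, cs.foldl pvScanStep (a, b) = cs.foldl pvLookStep (a, b) := by
  induction cs with
  | nil => intro a b; simp
  | cons c cs ih =>
    intro a b
    have hc := pvStep_agree c (h c (by simp))
    have h' : ∀ x ∈ cs, x ∈ pvBase.flatten := fun x hx => h x (by simp [hx])
    simp only [List.foldl_cons]
    rw [pvScanStep_shift, pvLookStep_shift, hc]
    rcases pvLookStep ([], []) c with ⟨u, v⟩
    exact ih h' (a ++ u) (b ++ v)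

theorem pvBuildGo_eq (u v : Int → Int) (n : Nat) :
    ∀ (idx : List Int) (a : Nat) (acc : List Int), acc.length = 2 * a → a + idx.length = n →
      (n % 2 = 0 → 2 * a ≤ n) →
      pvBuildGo u v (n : Int) idx acc =
        acc ++ (if n % 2 = 0 then (idx.flatMap fun i => [u i, v i]).take (n - 2 * a)
                else idx.flatMap fun i => [u i, v i]) := by
  intro idx
  induction idx with
  | nil =>
    intro a acc h1 h2 h3
    simp [pvBuildGo]
  | cons i rest ih =>
    intro a acc h1 h2 h3
    simp only [pvBuildGo, pvLeng_eq, beq_iff_eq, Nat.cast_inj]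
    by_cases hb : acc.length = n
    · rw [if_pos hb]
      have hev : n % 2 = 0 := by omega
      have h0 : n - 2 * a = 0 := by omega
      simp [hev, h0]
    · rw [if_neg hb]
      have h2a : 2 * a ≠ n := by omega
      rw [ih (a + 1) (acc ++ [u i, v i]) (by simp [h1]; omega) (by simp at h2 ⊢; omega)
          (by intro hev; have := h3 hev; omega)]
      by_cases hev : n % 2 = 0
      · have hge : 2 ≤ n - 2 * a := by have := h3 hev; omega
        have hsplit : n - 2 * a = (n - 2 * (a + 1)) + 1 + 1 := by omega
        simp only [hev, if_pos rfl, List.flatMap_cons, List.cons_append, List.nil_append,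
          hsplit, List.take_succ_cons, List.append_assoc]
        simp
      · simp [hev]

theorem pvPairs_len (m : Nat) (f g : Nat → Int) :
    ((List.range m).flatMap fun t => [f t, g t]).length = 2 * m := by
  induction m with
  | zero => simp
  | succ m ih => rw [List.range_succ]; simp [ih]; omega

theorem pvPairs_get (m : Nat) (f g : Nat → Int) (i : Nat) (h : i < 2 * m) :
    ((List.range m).flatMap fun t => [f t, g t])[i]? =
      some (if i % 2 = 0 then f (i / 2) else g (i / 2)) := by
  induction m with
  | zero => omega
  | succ m ih =>
    rw [List.range_succ, List.flatMap_append]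
    by_cases hi : i < 2 * m
    · rw [List.getElem?_append_left (by rw [pvPairs_len]; omega), ih hi]
    · rw [List.getElem?_append_right (by rw [pvPairs_len]; omega)]
      rw [pvPairs_len]
      have hcase : i = 2 * m ∨ i = 2 * m + 1 := by omega
      rcases hcase with h2 | h2 <;> subst h2
      · have h0 : 2 * m - 2 * m = 0 := by omega
        rw [h0]
        simp only [List.flatMap_cons, List.flatMap_nil, List.append_nil, List.getElem?_cons_zero,
          Nat.mul_mod_right, if_pos rfl, Option.some.injEq]
        congr 1; omega
      · have h1 : 2 * m + 1 - 2 * m = 1 := by omega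
        rw [h1]
        have h2 : ¬((2 * m + 1) % 2 = 0) := by omega
        simp only [List.flatMap_cons, List.flatMap_nil, List.append_nil, List.getElem?_cons_succ,
          List.getElem?_cons_zero, if_neg h2, Option.some.injEq]
        congr 1; omega

theorem pvGetIf (f g : Nat → Int) (n k : Nat) (hk : k < n) :
    PySem.List.pyGetD (if n % 2 = 0 then ((List.range n).flatMap fun t => [f t, g t]).take n
                       else (List.range n).flatMap fun t => [f t, g t]) (k : Int) 0
      = if k % 2 = 0 then f (k / 2) else g (k / 2) := by
  rw [PySem.List.pyGetD_natCast, List.getD_eq_getElem?_getD]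
  split_ifs with hev hp hp
  · rw [List.getElem?_take, if_pos hk, pvPairs_get n f g k (by omega)]
    simp [hp]
  · rw [List.getElem?_take, if_pos hk, pvPairs_get n f g k (by omega)]
    simp [hp]
  · rw [pvPairs_get n f g k (by omega)]
    simp [hp]
  · rw [pvPairs_get n f g k (by omega)]
    simp [hp]

theorem pvElem (row col : List Int) (n k : Nat) (hk : k < n) :
    pvBget
      (PySem.List.pyGetD (if n % 2 = 0
          then ((List.range n).flatMap fun t =>
            [PySem.List.pyGetD row ((t : Nat) : Int) 0, PySem.List.pyGetD col ((t : Nat) : Int) 0]).take n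
          else (List.range n).flatMap fun t =>
            [PySem.List.pyGetD row ((t : Nat) : Int) 0, PySem.List.pyGetD col ((t : Nat) : Int) 0]) (k : Int) 0)
      (PySem.List.pyGetD (if n % 2 = 0
          then ((List.range n).flatMap fun t =>
            [PySem.List.pyGetD col ((n : Int) - 1 - ((t : Nat) : Int)) 0,
             PySem.List.pyGetD row ((n : Int) - 1 - ((t : Nat) : Int)) 0]).take n
          else (List.range n).flatMap fun t =>
            [PySem.List.pyGetD col ((n : Int) - 1 - ((t : Nat) : Int)) 0,
             PySem.List.pyGetD row ((n : Int) - 1 - ((t : Nat) : Int)) 0]) (k : Int) 0)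
      = pvOutChar row col (n : Int) (k : Int) := by
  rw [pvGetIf (fun t => PySem.List.pyGetD row ((t : Nat) : Int) 0)
        (fun t => PySem.List.pyGetD col ((t : Nat) : Int) 0) n k hk,
      pvGetIf (fun t => PySem.List.pyGetD col ((n : Int) - 1 - ((t : Nat) : Int)) 0)
        (fun t => PySem.List.pyGetD row ((n : Int) - 1 - ((t : Nat) : Int)) 0) n k hk]
  have hfd : PySem.Int.floordiv (k : Int) 2 = ((k / 2 : Nat) : Int) := by
    exact_mod_cast PySem.Int.floordiv_natCast k 2
  have hmd : PySem.Int.mod (k : Int) 2 = ((k % 2 : Nat) : Int) := by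
    exact_mod_cast PySem.Int.mod_natCast k 2
  simp only [pvOutChar, hfd, hmd]
  by_cases hpar : k % 2 = 0
  · simp [hpar]
  · have hb : (((k % 2 : Nat) : Int) == (0 : Int)) = false := by simp; omega
    simp [hpar, hb]
    intro hdvd
    exact absurd (by exact_mod_cast hdvd : 2 ∣ k) (by omega)

-- ===== VERDICT (by name: the statement is the Claim_ definition above) =====
theorem uncipher_spec : Claim_equal_uncipher := by
  intro text _ hpre
  have hpre' : ∀ c ∈ text.toList, c ∈ pvBase.flatten := by
    intro c hc
    unfold Pre_uncipher at hpre
    rw [List.all_eq_true] at hpre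
    simpa using hpre c hc
  unfold Spec_uncipher uncipher uncipher_alt
  simp only [PySem.Str.len_eq, pvLeng_eq]
  rw [pvRows_eq text.toList hpre' [] []]
  rcases hrc : text.toList.foldl pvLookStep ([], []) with ⟨row, col⟩
  simp only
  congr 1
  rw [PySem.List.foldl_append_singleton_eq_map
        (fun i => pvBget (PySem.List.pyGetD (pvBuildGo (fun i => PySem.List.pyGetD row i 0)
          (fun i => PySem.List.pyGetD col i 0) (↑text.toList.length)
          (PySem.List.pyRange 0 (↑text.toList.length)) []) i 0)
        (PySem.List.pyGetD (pvBuildGo (fun i => PySem.List.pyGetD col i 0)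
          (fun i => PySem.List.pyGetD row i 0) (↑text.toList.length)
          (PySem.List.pyRange ((↑text.toList.length) - 1) (-1) (-1)) []) i 0)),
      PySem.List.foldl_append_singleton_eq_map
        (pvOutChar row col (↑text.toList.length))]
  simp only [List.nil_append]
  set n := text.toList.length with hn
  have hlen1 : (0 : Nat) + (PySem.List.pyRange 0 (n : Int)).length = n := by
    rw [PySem.List.length_pyRange_one]; omega
  have hrow1 := pvBuildGo_eq (fun i => PySem.List.pyGetD row i 0)
      (fun i => PySem.List.pyGetD col i 0) n (PySem.List.pyRange 0 (n : Int)) 0 []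
      (by simp) hlen1 (by intro _; omega)
  have hlen2 : (0 : Nat) + (PySem.List.pyRange ((n : Int) - 1) (-1) (-1)).length = n := by
    rw [PySem.List.length_pyRange_neg_one]; omega
  have hcol1 := pvBuildGo_eq (fun i => PySem.List.pyGetD col i 0)
      (fun i => PySem.List.pyGetD row i 0) n (PySem.List.pyRange ((n : Int) - 1) (-1) (-1)) 0 []
      (by simp) hlen2 (by intro _; omega)
  rw [hrow1, hcol1]
  have hneg : PySem.List.pyRange ((n : Int) - 1) (-1) (-1)
      = (List.range n).map (fun t => (n : Int) - 1 - ((t : Nat) : Int)) := by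
    have ht : ((n : Int) - 1 - (-1)).toNat = n := by omega
    rw [PySem.List.pyRange_neg_one, ht]
  rw [PySem.List.pyRange_zero_nat n, hneg, List.flatMap_map, List.flatMap_map, List.map_map,
    List.map_map]
  apply List.map_congr_left
  intro k hk
  rw [List.mem_range] at hk
  simp only [Function.comp_apply, Nat.mul_zero, Nat.sub_zero, List.nil_append]
  exact pvElem row col n k hk
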